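-- pv_equiv track=rewrite | github.com/ZhangShiyue/QGforQA | QG/BERT_QG/eval.py | convert_to_words
-- ===== SOURCE A (Python) =====
-- def convert_to_words(map_to_orig, question):
--     """convert bert word pieces to normal tokens"""
--     i = 0
--     words = []
--     while i < len(question):
--         end = i + 1
--         word = question[i]
--         for j in range(i + 1, len(question)):
--             if j - i > 17:
--                 break
--             key = tuple(question[i:j])
--             if key in map_to_orig:
--                 word = map_to_orig[key]
--                 end = j
--         i = end
--         words.append(word.replace("##", ""))
--     return words
-- ===== SOURCE B (Python) =====
-- def convert_to_words(map_to_orig, question):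
--     """convert bert word pieces to normal tokens"""
--     n = len(question)
--     # group the dict's entries by the first word piece of the key, once
--     index = {}
--     for key, val in map_to_orig.items():
--         if key:
--             index.setdefault(key[0], []).append((key, val))
--     words = []
--     i = 0
--     while i < n:
--         best = question[i]
--         best_len = 0
--         # only entries whose key starts with question[i] can match here;
--         # keep the longest one (17-length cap, last token excluded)
--         for key, val in index.get(question[i], []):
--             L = len(key)
--             if best_len < L <= 17 and i + L < n and tuple(question[i:i + L]) == key:
--                 best = val
--                 best_len = L
--         i += max(best_len, 1)
--         words.append(best.replace("##", ""))
--     return words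
-- ===== Notes on version B (the rewrite author's own statement) =====
-- stated objective: alternative
-- what changed: B inverts the traversal: instead of enumerating candidate end positions j and looking each slice up in the dict, it groups the dict's entries once into an index keyed by the key's first word piece and, per output token, scans only the bucket of question[i], keeping the longest matching key (17-length cap, last token excluded); B trades A's per-position slice hashing for per-bucket scans, so it is not uniformly faster.
import Mathlib
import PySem

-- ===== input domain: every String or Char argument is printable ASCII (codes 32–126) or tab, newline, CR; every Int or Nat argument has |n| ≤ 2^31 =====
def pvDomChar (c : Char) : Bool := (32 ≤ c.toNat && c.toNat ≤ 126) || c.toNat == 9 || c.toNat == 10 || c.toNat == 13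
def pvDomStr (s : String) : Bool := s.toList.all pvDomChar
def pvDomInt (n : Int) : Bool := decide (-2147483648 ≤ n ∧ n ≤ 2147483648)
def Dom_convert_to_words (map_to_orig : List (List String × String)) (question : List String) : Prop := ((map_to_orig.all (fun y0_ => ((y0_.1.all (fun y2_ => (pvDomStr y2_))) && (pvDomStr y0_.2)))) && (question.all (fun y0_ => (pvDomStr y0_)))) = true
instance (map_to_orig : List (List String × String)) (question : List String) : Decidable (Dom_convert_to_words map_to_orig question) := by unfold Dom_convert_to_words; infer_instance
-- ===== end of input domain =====

-- B inverts the traversal: A enumerates candidate end positions j and looks each slice up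
-- in the dict; B groups the dict's entries once into an index keyed by the key's first word
-- piece and, per output token, scans only the bucket of question[i], keeping the longest
-- matching key (17-length cap, last token excluded). Alternative decomposition, not faster.

-- key in dict / dict[key]: Python dict as association list, first match wins (used by port A)
def pvLookup (m : List (List String × String)) (key : List String) : Option String :=
  match m with
  | [] => none
  | (k, v) :: rest => if k == key then some v else pvLookup rest key

-- ===== PORT A =====
-- inner 'for j in range(i+1, len(question))' with the 'if j - i > 17: break' and last-match overwrite
def pvInnerA (m : List (List String × String)) (q : List String) (i : Nat) :
    List Int → String × Nat → String × Nat
  | [], st => st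
  | j :: rest, st =>
    if 17 < j - (i : Int) then st
    else
      match pvLookup m (PySem.List.slice q (some (i : Int)) (some j)) with
      | some v => pvInnerA m q i rest (v, j.toNat)
      | none => pvInnerA m q i rest st

-- 'while i < len(question)'; fuel = len(question) only guards totality (i strictly increases each step)
def pvLoopA (m : List (List String × String)) (q : List String) : Nat → Nat → List String
  | 0, _ => []
  | fuel + 1, i =>
    if i < q.length then
      let st := pvInnerA m q i (PySem.List.pyRange ((i : Int) + 1) (q.length : Int) 1) (q.getD i "", i + 1)
      PySem.Str.replace st.1 "##" "" :: pvLoopA m q fuel st.2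
    else []

def convert_to_words (map_to_orig : List (List String × String)) (question : List String) : List String :=
  pvLoopA map_to_orig question question.length 0

-- ===== PORT B =====
-- 'index.setdefault(key[0], []).append((key, val))': group the dict entries by first word piece
def pvBuildIndex : List (List String × String) →
    PySem.Dict String (List (List String × String)) → PySem.Dict String (List (List String × String))
  | [], d => d
  | (k, v) :: rest, d =>
    match k with
    | [] => pvBuildIndex rest d
    | t :: _ => pvBuildIndex rest (d.modify t [] (· ++ [(k, v)]))

-- 'for key, val in index.get(question[i], [])': scan the bucket, keep the longest prefix match
def pvScan (q : List String) (n i : Nat) :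
    List (List String × String) → String × Nat → String × Nat
  | [], st => st
  | (k, v) :: rest, (best, blen) =>
    if blen < k.length ∧ k.length ≤ 17 ∧ i + k.length < n ∧
        PySem.List.slice q (some (i : Int)) (some ((i : Int) + (k.length : Int))) = k
    then pvScan q n i rest (v, k.length)
    else pvScan q n i rest (best, blen)

def pvLoopB (idx : PySem.Dict String (List (List String × String))) (q : List String) (n : Nat) : Nat → Nat → List String
  | 0, _ => []
  | fuel + 1, i =>
    if i < n then
      let st := pvScan q n i (idx.getD (q.getD i "") []) (q.getD i "", 0)
      PySem.Str.replace st.1 "##" "" :: pvLoopB idx q n fuel (i + max st.2 1)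
    else []

def convert_to_words_alt (map_to_orig : List (List String × String)) (question : List String) : List String :=
  pvLoopB (pvBuildIndex map_to_orig PySem.Dict.empty) question question.length question.length 0

-- ===== PRECONDITION & SPEC =====
def Spec_convert_to_words (map_to_orig : List (List String × String)) (question : List String) (out : List String) : Prop := out = convert_to_words_alt map_to_orig question
instance (map_to_orig : List (List String × String)) (question : List String) (out : List String) : Decidable (Spec_convert_to_words map_to_orig question out) := by unfold Spec_convert_to_words; infer_instance

-- ===== CLAIM (what is proved, stated in full; the proofs are below) =====
def Claim_equal_convert_to_words : Prop := ∀ (map_to_orig : List (List String × String)) (question : List String), Dom_convert_to_words map_to_orig question → Spec_convert_to_words map_to_orig question (convert_to_words map_to_orig question)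

-- ===== LEMMAS AND PROOFS =====

-- break-free last-match fold (proof-side model of A's inner loop below the break threshold)
def pvLastM (m : List (List String × String)) (q : List String) (i : Nat) :
    List Int → String × Nat → String × Nat
  | [], st => st
  | j :: rest, st =>
    pvLastM m q i rest
      (match pvLookup m (PySem.List.slice q (some (i : Int)) (some j)) with
       | some v => (v, j.toNat)
       | none => st)

-- proof-side common form: try lengths K, K-1, …, 1 top-down (first hit is the longest match)
def pvPick (m : List (List String × String)) (q : List String) (i n : Nat) : Nat → String × Nat
  | 0 => (q.getD i "", i + 1)
  | K + 1 =>
    if i + (K + 1) < n then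
      match pvLookup m (PySem.List.slice q (some (i : Int)) (some ((i : Int) + ((K + 1 : Nat) : Int)))) with
      | some v => (v, i + (K + 1))
      | none => pvPick m q i n K
    else pvPick m q i n K

theorem pvInnerA_no_break (m : List (List String × String)) (q : List String) (i : Nat)
    (l1 l2 : List Int) (st : String × Nat) (h : ∀ j ∈ l1, j - (i : Int) ≤ 17) :
    pvInnerA m q i (l1 ++ l2) st = pvInnerA m q i l2 (pvLastM m q i l1 st) := by
  induction l1 generalizing st with
  | nil => simp [pvLastM]
  | cons j rest ih =>
    have hj : ¬ 17 < j - (i : Int) := by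
      have := h j (by simp); omega
    simp only [List.cons_append, pvInnerA, pvLastM, if_neg hj]
    cases pvLookup m (PySem.List.slice q (some (i : Int)) (some j)) with
    | none => exact ih _ (fun x hx => h x (by simp [hx]))
    | some v => exact ih _ (fun x hx => h x (by simp [hx]))

theorem pvLastM_append_singleton (m : List (List String × String)) (q : List String) (i : Nat)
    (l : List Int) (j : Int) (st : String × Nat) :
    pvLastM m q i (l ++ [j]) st =
      (match pvLookup m (PySem.List.slice q (some (i : Int)) (some j)) with
       | some v => (v, j.toNat)
       | none => pvLastM m q i l st) := by
  induction l generalizing st with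
  | nil =>
    cases h : pvLookup m (PySem.List.slice q (some (i : Int)) (some j)) <;>
      simp [pvLastM, h]
  | cons k rest ih =>
    simp only [List.cons_append, pvLastM]
    rw [ih]

-- A's inner loop equals the top-down pick of the longest match (K = 17)
theorem pvLastM_eq_pvPick (m : List (List String × String)) (q : List String) (i n : Nat)
    (hin : i < n) (K : Nat) :
    pvLastM m q i (PySem.List.pyRange ((i : Int) + 1) (min ((i : Int) + 1 + (K : Int)) (n : Int)) 1)
        (q.getD i "", i + 1) = pvPick m q i n K := by
  induction K with
  | zero =>
    have h0 : min ((i : Int) + 1 + ((0 : Nat) : Int)) (n : Int) = (i : Int) + 1 := by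
      push_cast; omega
    rw [h0, PySem.List.pyRange_one_eq_nil (by omega)]
    rfl
  | succ K ih =>
    by_cases hlt : i + (K + 1) < n
    · have hmin : min ((i : Int) + 1 + ((K : Int) + 1)) (n : Int) = ((i : Int) + ((K : Int) + 1)) + 1 := by omega
      have hmin2 : min ((i : Int) + 1 + (K : Int)) (n : Int) = (i : Int) + 1 + (K : Int) := by omega
      have hsplit : PySem.List.pyRange ((i : Int) + 1) (((i : Int) + ((K : Int) + 1)) + 1) 1 =
          PySem.List.pyRange ((i : Int) + 1) ((i : Int) + ((K : Int) + 1)) 1 ++ [(i : Int) + ((K : Int) + 1)] :=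
        PySem.List.pyRange_one_succ_right (by omega)
      simp only [pvPick, if_pos hlt]
      push_cast [hmin, hsplit, pvLastM_append_singleton]
      have harg : (i : Int) + ((K : Int) + 1) = (i : Int) + (K : Int) + 1 := by ring
      rw [harg]
      cases hlk : pvLookup m (PySem.List.slice q (some (i : Int)) (some ((i : Int) + (K : Int) + 1))) with
      | some v =>
        simp only []
        have : ((i : Int) + (K : Int) + 1).toNat = i + (K + 1) := by omega
        rw [this]
      | none =>
        have harg2 : (i : Int) + (K : Int) + 1 = (i : Int) + 1 + (K : Int) := by ring
        rw [harg2, ← hmin2]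
        exact ih
    · have hge : (n : Int) ≤ (i : Int) + 1 + (K : Int) := by omega
      have h1 : min ((i : Int) + 1 + ((K : Int) + 1)) (n : Int) = (n : Int) := by omega
      have h2 : min ((i : Int) + 1 + (K : Int)) (n : Int) = (n : Int) := by omega
      simp only [pvPick, if_neg hlt]
      push_cast [h1]
      rw [← h2, ih]

-- pvLookup helpers
theorem pvLookup_append_not_mem (xs ys : List (List String × String)) (key : List String)
    (h : ∀ kv ∈ xs, kv.1 ≠ key) : pvLookup (xs ++ ys) key = pvLookup ys key := by
  induction xs with
  | nil => rfl
  | cons kv rest ih =>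
    have hne : ¬ (kv.1 == key) = true := by
      simp only [beq_iff_eq]; exact h kv (by simp)
    simp only [List.cons_append, pvLookup, if_neg hne]
    exact ih (fun x hx => h x (by simp [hx]))

theorem pvLookup_mem (m : List (List String × String)) (key : List String) (v : String)
    (h : pvLookup m key = some v) : (key, v) ∈ m := by
  induction m with
  | nil => simp [pvLookup] at h
  | cons kv rest ih =>
    obtain ⟨k1, v1⟩ := kv
    simp only [pvLookup] at h
    by_cases he : (k1 == key) = true
    · rw [if_pos he] at h
      have hk : k1 = key := by simpa [beq_iff_eq] using he
      have hv : v1 = v := by injection h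
      simp [hk, hv]
    · rw [if_neg he] at h
      exact List.mem_cons_of_mem _ (ih h)

-- the condition under which a key is a usable match at position i
def pvCond (q : List String) (n i : Nat) (k : List String) : Prop :=
  k.length ≤ 17 ∧ i + k.length < n ∧
    PySem.List.slice q (some (i : Int)) (some ((i : Int) + (k.length : Int))) = k

-- invariant of B's entry scan: best is the first-match value of the longest usable key seen
theorem pvScan_inv (q : List String) (n i : Nat) (m : List (List String × String)) :
    ∀ (e pre : List (List String × String)) (best : String) (blen : Nat),
    m = pre ++ e →
    ((blen = 0 ∧ best = q.getD i "") ∨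
      (0 < blen ∧ blen ≤ 17 ∧ i + blen < n ∧
        pvLookup m (PySem.List.slice q (some (i : Int)) (some ((i : Int) + (blen : Int)))) = some best)) →
    (∀ kv ∈ pre, pvCond q n i kv.1 → kv.1.length ≤ blen) →
    (((pvScan q n i e (best, blen)).2 = 0 ∧ (pvScan q n i e (best, blen)).1 = q.getD i "") ∨
      (0 < (pvScan q n i e (best, blen)).2 ∧ (pvScan q n i e (best, blen)).2 ≤ 17 ∧
        i + (pvScan q n i e (best, blen)).2 < n ∧
        pvLookup m (PySem.List.slice q (some (i : Int)) (some ((i : Int) + ((pvScan q n i e (best, blen)).2 : Int)))) = some (pvScan q n i e (best, blen)).1)) ∧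
    (∀ kv ∈ m, pvCond q n i kv.1 → kv.1.length ≤ (pvScan q n i e (best, blen)).2) := by
  intro e
  induction e with
  | nil =>
    intro pre best blen hm h1 h2
    refine ⟨?_, ?_⟩
    · cases h1 with
      | inl h => exact Or.inl h
      | inr h => exact Or.inr h
    · intro kv hkv hc
      exact h2 kv (by simpa [hm] using hkv) hc
  | cons hd rest ih =>
    intro pre best blen hm h1 h2
    obtain ⟨k, v⟩ := hd
    by_cases hc : blen < k.length ∧ k.length ≤ 17 ∧ i + k.length < n ∧
        PySem.List.slice q (some (i : Int)) (some ((i : Int) + (k.length : Int))) = k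
    · simp only [pvScan, if_pos hc]
      have hck : pvCond q n i k := ⟨hc.2.1, hc.2.2.1, hc.2.2.2⟩
      refine ih (pre ++ [(k, v)]) v k.length (by simp [hm]) ?_ ?_
      · refine Or.inr ⟨by have := hc.1; omega, hc.2.1, hc.2.2.1, ?_⟩
        rw [hm, hc.2.2.2]
        rw [pvLookup_append_not_mem]
        · simp [pvLookup]
        · intro kv hkv heq
          have hkl : kv.1.length ≤ blen := by
            apply h2 kv hkv
            rw [heq]; exact hck
          rw [heq] at hkl
          omega
      · intro kv hkv hcv
        rcases List.mem_append.1 hkv with hx | hx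
        · have := h2 kv hx hcv; omega
        · simp at hx
          simp [hx]
    · simp only [pvScan, if_neg hc]
      refine ih (pre ++ [(k, v)]) best blen (by simp [hm]) h1 ?_
      intro kv hkv hcv
      rcases List.mem_append.1 hkv with hx | hx
      · exact h2 kv hx hcv
      · simp at hx
        subst hx
        by_contra hgt
        have hgt' : blen < k.length := by simpa using Nat.lt_of_not_le hgt
        exact hc ⟨hgt', hcv.1, hcv.2.1, hcv.2.2⟩

-- the slice q[i:i+L] has length L when it fits strictly inside q
theorem pvSlice_length (q : List String) (i L : Nat) (h : i + L ≤ q.length) :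
    (PySem.List.slice q (some (i : Int)) (some ((i : Int) + (L : Int)))).length = L := by
  rw [PySem.List.slice_natCast_add]
  simp
  omega

-- from the scan invariant: pvPick produces exactly the scan's (best, i + max blen 1)
theorem pvPick_of_scan (m : List (List String × String)) (q : List String) (i n : Nat)
    (hn : n = q.length)
    (r : String × Nat)
    (hr1 : (r.2 = 0 ∧ r.1 = q.getD i "") ∨
      (0 < r.2 ∧ r.2 ≤ 17 ∧ i + r.2 < n ∧
        pvLookup m (PySem.List.slice q (some (i : Int)) (some ((i : Int) + (r.2 : Int)))) = some r.1))
    (hr2 : ∀ kv ∈ m, pvCond q n i kv.1 → kv.1.length ≤ r.2) :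
    ∀ K, K ≤ 17 → r.2 ≤ K → pvPick m q i n K = (r.1, i + max r.2 1) := by
  intro K
  induction K with
  | zero =>
    intro _ hle
    rcases hr1 with ⟨h0, hb⟩ | ⟨hpos, _, _, _⟩
    · simp [pvPick, h0, hb]
    · omega
  | succ K ih =>
    intro h17 hle
    by_cases heq : r.2 = K + 1
    · rcases hr1 with ⟨h0, _⟩ | ⟨hpos, hb17, hbn, hlk⟩
      · omega
      · have hin : i + (K + 1) < n := by omega
        have hcast : ((K + 1 : Nat) : Int) = ((r.2 : Nat) : Int) := by exact_mod_cast heq.symm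
        simp only [pvPick, if_pos hin, hcast, hlk]
        have harg : i + (K + 1) = i + max r.2 1 := by omega
        rw [harg]
    · have hlt : r.2 ≤ K := by omega
      have hnone : i + (K + 1) < n →
          pvLookup m (PySem.List.slice q (some (i : Int)) (some ((i : Int) + ((K + 1 : Nat) : Int)))) = none := by
        intro hin
        cases hlk : pvLookup m (PySem.List.slice q (some (i : Int)) (some ((i : Int) + ((K + 1 : Nat) : Int)))) with
        | none => rfl
        | some v =>
          exfalso
          have hmem := pvLookup_mem _ _ _ hlk
          have hlen : (PySem.List.slice q (some (i : Int)) (some ((i : Int) + ((K + 1 : Nat) : Int)))).length = K + 1 :=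
            pvSlice_length q i (K + 1) (by omega)
          have hcond : pvCond q n i (PySem.List.slice q (some (i : Int)) (some ((i : Int) + ((K + 1 : Nat) : Int)))) := by
            refine ⟨by omega, by omega, ?_⟩
            rw [hlen]
          have := hr2 _ hmem hcond
          simp only at this
          rw [hlen] at this
          omega
      by_cases hin : i + (K + 1) < n
      · simp only [pvPick, if_pos hin, hnone hin]
        exact ih (by omega) hlt
      · simp only [pvPick, if_neg hin]
        exact ih (by omega) hlt

-- the index built by B is exactly the grouping of m's entries by first word piece
theorem pvBuildIndex_getD (e : List (List String × String))
    (d : PySem.Dict String (List (List String × String))) (t : String) :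
    (pvBuildIndex e d).getD t [] =
      d.getD t [] ++ e.filter (fun kv => kv.1.head? == some t) := by
  induction e generalizing d with
  | nil => simp [pvBuildIndex]
  | cons hd rest ih =>
    obtain ⟨k, v⟩ := hd
    match k with
    | [] => simp [pvBuildIndex, ih]
    | h :: ks =>
      simp only [pvBuildIndex]
      rw [ih]
      by_cases ht : h = t
      · subst ht
        rw [PySem.Dict.getD_modify_self]
        simp
      · rw [PySem.Dict.getD_modify_of_ne]
        · simp [ht]
        · exact fun hc => ht hc.symm

-- entries whose key does not start with question[i] never match: the scan sees only the bucket
theorem pvScan_filter (q : List String) (n i : Nat) (hn : n ≤ q.length) (hin : i < n)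
    (e : List (List String × String)) (st : String × Nat) :
    pvScan q n i (e.filter (fun kv => kv.1.head? == some (q.getD i ""))) st =
      pvScan q n i e st := by
  induction e generalizing st with
  | nil => rfl
  | cons hd rest ih =>
    obtain ⟨k, v⟩ := hd
    obtain ⟨best, blen⟩ := st
    by_cases hh : k.head? = some (q.getD i "")
    · rw [List.filter_cons_of_pos (by simpa using hh)]
      simp only [pvScan]
      by_cases hc : blen < k.length ∧ k.length ≤ 17 ∧ i + k.length < n ∧
          PySem.List.slice q (some (i : Int)) (some ((i : Int) + (k.length : Int))) = k
      · rw [if_pos hc, if_pos hc, ih]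
      · rw [if_neg hc, if_neg hc, ih]
    · rw [List.filter_cons_of_neg (by simpa using hh)]
      rw [ih]
      simp only [pvScan]
      rw [if_neg]
      intro hc
      apply hh
      obtain ⟨h1, _, h3, h4⟩ := hc
      have hL : 0 < k.length := by omega
      have hslice : PySem.List.slice q (some (i : Int)) (some ((i : Int) + (k.length : Int))) =
          (q.drop i).take k.length := PySem.List.slice_natCast_add q i k.length
      have hhead : ((q.drop i).take k.length).head? = k.head? := by
        rw [← hslice, h4]
      rw [← hhead, List.head?_take, if_neg (by omega), List.head?_drop,
        List.getElem?_eq_getElem (by omega)]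
      congr 1
      exact (List.getD_eq_getElem q "" (by omega : i < q.length)).symm

-- per-position equality of the two inner computations
theorem pvInner_eq (m : List (List String × String)) (q : List String) (i : Nat)
    (hin : i < q.length) :
    pvInnerA m q i (PySem.List.pyRange ((i : Int) + 1) ((q.length : Int)) 1) (q.getD i "", i + 1) =
      ((pvScan q q.length i m (q.getD i "", 0)).1,
        i + max (pvScan q q.length i m (q.getD i "", 0)).2 1) := by
  set n := q.length with hn
  -- A-side: drop the break, restrict the range to min(i+18, n)
  have hsplit : PySem.List.pyRange ((i : Int) + 1) (n : Int) 1 =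
      PySem.List.pyRange ((i : Int) + 1) (min ((i : Int) + 1 + 17) (n : Int)) 1 ++
      PySem.List.pyRange (min ((i : Int) + 1 + 17) (n : Int)) (n : Int) 1 :=
    PySem.List.pyRange_one_append _ _ _ (by omega) (by omega)
  rw [hsplit, pvInnerA_no_break m q i _ _ _
      (fun j hj => by
        have := (PySem.List.mem_pyRange_one).1 hj
        omega)]
  have htail : pvInnerA m q i (PySem.List.pyRange (min ((i : Int) + 1 + 17) (n : Int)) (n : Int) 1)
      (pvLastM m q i (PySem.List.pyRange ((i : Int) + 1) (min ((i : Int) + 1 + 17) (n : Int)) 1) (q.getD i "", i + 1)) =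
      pvLastM m q i (PySem.List.pyRange ((i : Int) + 1) (min ((i : Int) + 1 + 17) (n : Int)) 1) (q.getD i "", i + 1) := by
    by_cases hle : (n : Int) ≤ (i : Int) + 18
    · rw [PySem.List.pyRange_one_eq_nil (by omega)]
      rfl
    · rw [PySem.List.pyRange_one_cons (by omega)]
      have hmin : min ((i : Int) + 1 + 17) (n : Int) = (i : Int) + 18 := by omega
      simp only [pvInnerA, hmin]
      rw [if_pos (by omega)]
  rw [htail]
  have hA : pvLastM m q i (PySem.List.pyRange ((i : Int) + 1) (min ((i : Int) + 1 + 17) (n : Int)) 1)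
      (q.getD i "", i + 1) = pvPick m q i n 17 := by
    have := pvLastM_eq_pvPick m q i n hin 17
    simpa using this
  rw [hA]
  -- B-side: scan invariant + pick characterisation
  have hinv := pvScan_inv q n i m m [] (q.getD i "") 0 (by simp) (Or.inl ⟨rfl, rfl⟩) (by simp)
  exact pvPick_of_scan m q i n hn _ hinv.1 hinv.2 17 (le_refl 17)
    (by rcases hinv.1 with ⟨h0, _⟩ | ⟨_, h17, _, _⟩ <;> omega)

theorem pvBucket_scan (m : List (List String × String)) (q : List String) (i : Nat)
    (h : i < q.length) (st : String × Nat) :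
    pvScan q q.length i ((pvBuildIndex m PySem.Dict.empty).getD (q.getD i "") []) st =
      pvScan q q.length i m st := by
  rw [pvBuildIndex_getD, PySem.Dict.getD_empty, List.nil_append,
    pvScan_filter q q.length i (le_refl _) h]

theorem pvLoopA_eq_pvLoopB (m : List (List String × String)) (q : List String)
    (fuel i : Nat) :
    pvLoopA m q fuel i = pvLoopB (pvBuildIndex m PySem.Dict.empty) q q.length fuel i := by
  induction fuel generalizing i with
  | zero => rfl
  | succ fuel ih =>
    simp only [pvLoopA, pvLoopB]
    by_cases h : i < q.length
    · rw [if_pos h, if_pos h, pvBucket_scan m q i h, pvInner_eq m q i h, ih]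
    · rw [if_neg h, if_neg h]

-- ===== VERDICT (by name: the statement is the Claim_ definition above) =====
theorem convert_to_words_spec : Claim_equal_convert_to_words := by
  intro m q _
  unfold Spec_convert_to_words convert_to_words convert_to_words_alt
  exact pvLoopA_eq_pvLoopB m q q.length 0
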